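-- pv_equiv track=rewrite | github.com/Raphour/Math_SAE | test-machine.py | enlever_litt_for
-- ===== SOURCE A (Python) =====
-- def enlever_litt_for(formule,litteral):
--     '''Arguments :
-- formule : comme précédemment
-- litteral : un entier non nul traduisant la valeur logique prise par une variable
--     Renvoie : la formule simplifiée
-- '''
--     for i in range(len(formule)-1,-1,-1):#Pour toute les clauses de la formules
--         for j in range(len(formule[i])):#Pour tous les litteraux de la clause
--             if litteral==formule[i][j]:
--                 del formule[i]
--                 break
--             if litteral == -formule[i][j]:
--                 del formule[i][j]
--                 break
--     return formule
-- ===== SOURCE B (Python) =====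
-- def _first_hit(clause, litteral):
--     """Index and value of the first literal equal to litteral or -litteral, else None."""
--     for j, x in enumerate(clause):
--         if x == litteral or x == -litteral:
--             return j, x
--     return None
--
-- def enlever_litt_for(formule, litteral):
--     out = []
--     for clause in formule:
--         hit = _first_hit(clause, litteral)
--         if hit is None:
--             out.append(clause)
--         elif hit[1] != litteral:
--             j = hit[0]
--             out.append(clause[:j] + clause[j+1:])
--     return out
-- ===== Notes on version B (the rewrite author's own statement) =====
-- stated objective: simpler
-- what changed: Replaced the reverse index loop with in-place del on the outer list and nested index loop by a forward pass that builds a new survivor list, with a helper returning the first relevant literal (index,value) so no index deletion arithmetic remains; return value is identical, but B does not mutate its argument where A does.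
import Mathlib
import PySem

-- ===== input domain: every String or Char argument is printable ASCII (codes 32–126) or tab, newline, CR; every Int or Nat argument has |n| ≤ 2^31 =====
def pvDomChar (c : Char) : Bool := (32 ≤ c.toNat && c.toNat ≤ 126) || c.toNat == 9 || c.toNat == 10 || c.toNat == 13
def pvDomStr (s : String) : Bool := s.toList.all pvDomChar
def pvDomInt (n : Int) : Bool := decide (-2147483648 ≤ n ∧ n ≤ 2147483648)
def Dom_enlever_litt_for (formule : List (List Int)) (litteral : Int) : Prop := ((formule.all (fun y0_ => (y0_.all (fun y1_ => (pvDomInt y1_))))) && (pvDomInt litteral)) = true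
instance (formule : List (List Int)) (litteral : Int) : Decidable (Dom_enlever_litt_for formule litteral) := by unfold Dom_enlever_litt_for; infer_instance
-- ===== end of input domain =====

-- B builds a new survivor list in one forward pass instead of A's reverse in-place index
-- deletion (simpler); equivalence is about the RETURN value only: A mutates `formule` in place, B does not.

-- ===== PORT A =====
-- inner loop: for j over the clause; first literal equal to litteral → delete clause (some none),
-- first equal to -litteral → delete that literal (some (some rest)), loop ends → none (no action)
def pvScanA (litteral : Int) : List Int → Option (Option (List Int))
  | [] => none
  | x :: xs =>
    if litteral = x then some none
    else if litteral = -x then some (some xs)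
    else (pvScanA litteral xs).map (Option.map (x :: ·))

-- one outer-loop iteration: read formule[i], act on the clause (del formule[i] / del formule[i][j])
def pvStepA (litteral : Int) (f : List (List Int)) (i : Int) : List (List Int) :=
  match PySem.List.pyGet? f i with
  | none => f
  | some clause =>
    match pvScanA litteral clause with
    | none => f
    | some none => f.eraseIdx i.toNat
    | some (some c) => f.set i.toNat c

def enlever_litt_for (formule : List (List Int)) (litteral : Int) : List (List Int) :=
  (PySem.List.pyRange ((formule.length : Int) - 1) (-1) (-1)).foldl (pvStepA litteral) formule

-- ===== PORT B =====
-- _first_hit: first (index, value) with value = litteral or -litteral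
def pvFirstHit (litteral : Int) (j : Nat) : List Int → Option (Nat × Int)
  | [] => none
  | x :: xs => if x = litteral ∨ x = -litteral then some (j, x) else pvFirstHit litteral (j + 1) xs

def enlever_litt_for_alt (formule : List (List Int)) (litteral : Int) : List (List Int) :=
  formule.foldl (fun out clause =>
    match pvFirstHit litteral 0 clause with
    | none => out ++ [clause]
    | some (j, x) =>
      if x ≠ litteral then out ++ [clause.take j ++ clause.drop (j + 1)]
      else out) []

-- ===== PRECONDITION & SPEC =====
def Spec_enlever_litt_for (formule : List (List Int)) (litteral : Int) (out : List (List Int)) : Prop := out = enlever_litt_for_alt formule litteral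
instance (formule : List (List Int)) (litteral : Int) (out : List (List Int)) : Decidable (Spec_enlever_litt_for formule litteral out) := by unfold Spec_enlever_litt_for; infer_instance

-- ===== CLAIM (what is proved, stated in full; the proofs are below) =====
def Claim_equal_enlever_litt_for : Prop := ∀ (formule : List (List Int)) (litteral : Int), Dom_enlever_litt_for formule litteral → Spec_enlever_litt_for formule litteral (enlever_litt_for formule litteral)

-- ===== LEMMAS AND PROOFS =====

-- per-clause action, A's form
def pvActA (litteral : Int) (c : List Int) : Option (List Int) :=
  match pvScanA litteral c with
  | none => some c
  | some none => none
  | some (some r) => some r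

-- per-clause action, B's form
def pvActB (litteral : Int) (c : List Int) : Option (List Int) :=
  match pvFirstHit litteral 0 c with
  | none => some c
  | some (j, x) => if x ≠ litteral then some (c.take j ++ c.drop (j + 1)) else none

theorem pvFirstHit_shift (litteral : Int) (xs : List Int) (j : Nat) :
    pvFirstHit litteral j xs = (pvFirstHit litteral 0 xs).map (fun p => (p.1 + j, p.2)) := by
  induction xs generalizing j with
  | nil => simp [pvFirstHit]
  | cons x xs ih =>
    by_cases h : x = litteral ∨ x = -litteral
    · simp [pvFirstHit, h]
    · simp only [pvFirstHit, if_neg h, ih (j + 1), ih 1, Option.map_map]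
      cases pvFirstHit litteral 0 xs with
      | none => simp
      | some p => simp; omega

theorem pvActA_cons (litteral x : Int) (xs : List Int)
    (h1 : ¬ litteral = x) (h2 : ¬ litteral = -x) :
    pvActA litteral (x :: xs) = (pvActA litteral xs).map (x :: ·) := by
  unfold pvActA
  simp only [pvScanA, if_neg h1, if_neg h2]
  cases pvScanA litteral xs with
  | none => simp
  | some o => cases o <;> simp

theorem pvActB_cons (litteral x : Int) (xs : List Int)
    (h : ¬ (x = litteral ∨ x = -litteral)) :
    pvActB litteral (x :: xs) = (pvActB litteral xs).map (x :: ·) := by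
  unfold pvActB
  simp only [pvFirstHit, if_neg h, pvFirstHit_shift litteral xs 1]
  cases pvFirstHit litteral 0 xs with
  | none => simp
  | some p =>
    obtain ⟨j, y⟩ := p
    by_cases hy : y = litteral
    · simp [hy]
    · simp [hy, List.take_succ_cons, List.drop_succ_cons]

theorem pvAct_eq (litteral : Int) (c : List Int) : pvActA litteral c = pvActB litteral c := by
  induction c with
  | nil => rfl
  | cons x xs ih =>
    by_cases h1 : litteral = x
    · simp only [pvActA, pvActB, pvScanA, pvFirstHit, if_pos h1,
        if_pos (Or.inl h1.symm : x = litteral ∨ x = -litteral)]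
      simp [h1.symm]
    · by_cases h2 : litteral = -x
      · have hx : x = -litteral := by omega
        have hxne : ¬ x = litteral := fun h => h1 h.symm
        simp only [pvActA, pvActB, pvScanA, pvFirstHit, if_neg h1, if_pos h2,
          if_pos (Or.inr hx : x = litteral ∨ x = -litteral)]
        simp [hxne]
      · rw [pvActA_cons litteral x xs h1 h2,
          pvActB_cons litteral x xs (by rintro (h | h) <;> omega), ih]

-- one iteration of A's outer loop at index q.length acts only on the clause there
theorem pvStepA_at (litteral : Int) (c : List Int) (q s : List (List Int)) :
    pvStepA litteral (q ++ c :: s) (q.length : Int)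
      = q ++ (pvActA litteral c).toList ++ s := by
  unfold pvStepA
  have hget : PySem.List.pyGet? (q ++ c :: s) (q.length : Int) = some c := by
    rw [PySem.List.pyGet?_natCast]
    simp
  rw [hget]
  unfold pvActA
  cases hs : pvScanA litteral c with
  | none => simp [hs]
  | some o =>
    cases o with
    | none =>
      simp only [hs, Option.toList, Int.toNat_natCast]
      rw [List.eraseIdx_append_of_length_le (Nat.le_refl _)]
      simp
    | some r =>
      simp only [hs, Option.toList, Int.toNat_natCast]
      simp

-- A's reverse loop, acting on the unprocessed prefix p with the already-final suffix s untouched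
theorem pvLoopA (litteral : Int) (p s : List (List Int)) :
    (PySem.List.pyRange ((p.length : Int) - 1) (-1) (-1)).foldl (pvStepA litteral) (p ++ s)
      = p.filterMap (pvActA litteral) ++ s := by
  induction p using List.reverseRecOn generalizing s with
  | nil =>
    rw [PySem.List.pyRange_neg_one_eq_nil (by simp)]
    simp
  | append_singleton q c ih =>
    have hlen : ((q ++ [c]).length : Int) - 1 = (q.length : Int) := by simp
    rw [hlen, PySem.List.pyRange_neg_one_cons (by omega)]
    have hassoc : q ++ [c] ++ s = q ++ c :: s := by simp
    simp only [List.foldl_cons]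
    rw [hassoc, pvStepA_at litteral c q s, List.append_assoc,
      ih ((pvActA litteral c).toList ++ s)]
    simp only [List.filterMap_append, List.append_assoc, List.append_cancel_left_eq]
    cases h : pvActA litteral c <;> simp [h]

theorem pvAltB (litteral : Int) (formule : List (List Int)) :
    enlever_litt_for_alt formule litteral = formule.filterMap (pvActB litteral) := by
  unfold enlever_litt_for_alt
  suffices h : ∀ acc, formule.foldl (fun out clause =>
      match pvFirstHit litteral 0 clause with
      | none => out ++ [clause]
      | some (j, x) =>
        if x ≠ litteral then out ++ [clause.take j ++ clause.drop (j + 1)]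
        else out) acc = acc ++ formule.filterMap (pvActB litteral) by
    simpa using h []
  induction formule with
  | nil => simp
  | cons c cs ih =>
    intro acc
    simp only [List.foldl_cons, List.filterMap_cons, ih]
    unfold pvActB
    cases hh : pvFirstHit litteral 0 c with
    | none => simp
    | some p =>
      obtain ⟨j, x⟩ := p
      by_cases hx : x = litteral <;> simp [hx]

-- ===== VERDICT (by name: the statement is the Claim_ definition above) =====
theorem enlever_litt_for_spec : Claim_equal_enlever_litt_for := by
  intro formule litteral _
  unfold Spec_enlever_litt_for enlever_litt_for
  rw [pvAltB]
  have := pvLoopA litteral formule []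
  simp only [List.append_nil] at this
  rw [this]
  exact List.filterMap_congr (fun c _ => pvAct_eq litteral c)
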